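-- pv_equiv track=rewrite | github.com/denusilchuk9-cell/OPI1 | practicalwork27/security.py | sanitize_sql_input
-- ===== SOURCE A (Python) =====
-- def sanitize_sql_input(value):
--     dangerous_sql = [
--         'DROP TABLE',
--         'DELETE FROM',
--         'TRUNCATE',
--         'INSERT INTO',
--         'UPDATE SET',
--         'UNION SELECT',
--         '--',
--         ';'
--     ]
--
--     value_upper = value.upper()
--     for sql in dangerous_sql:
--         if sql in value_upper:
--             return ''
--
--     return value
-- ===== SOURCE B (Python) =====
-- def sanitize_sql_input(value):
--     dangerous_sql = (
--         'DROP TABLE',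
--         'DELETE FROM',
--         'TRUNCATE',
--         'INSERT INTO',
--         'UPDATE SET',
--         'UNION SELECT',
--         '--',
--         ';'
--     )
--     v = value.upper()
--     for i in range(len(v)):
--         if any(v.startswith(p, i) for p in dangerous_sql):
--             return ''
--     return value
-- ===== Notes on version B (the rewrite author's own statement) =====
-- stated objective: alternative
-- what changed: Instead of eight independent full-string substring scans (pattern-major), B uppercases once and makes a single position-major left-to-right pass, testing at each index whether any dangerous pattern starts there.
import Mathlib
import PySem

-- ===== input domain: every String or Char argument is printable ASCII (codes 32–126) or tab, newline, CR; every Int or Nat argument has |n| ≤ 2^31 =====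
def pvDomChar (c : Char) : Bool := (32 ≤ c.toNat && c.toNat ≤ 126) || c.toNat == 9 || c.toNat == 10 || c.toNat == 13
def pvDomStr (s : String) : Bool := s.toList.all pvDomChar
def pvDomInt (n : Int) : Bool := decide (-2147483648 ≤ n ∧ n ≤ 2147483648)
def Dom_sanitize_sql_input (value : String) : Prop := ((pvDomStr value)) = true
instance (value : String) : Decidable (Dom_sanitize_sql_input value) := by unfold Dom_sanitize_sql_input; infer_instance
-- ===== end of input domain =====

-- B replaces A's eight pattern-major substring scans with one position-major pass over the
-- uppercased string, testing at each index whether any dangerous pattern starts there (alternative).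


-- ===== PORT A =====
def pvDangerousA : List String :=
  ["DROP TABLE", "DELETE FROM", "TRUNCATE", "INSERT INTO", "UPDATE SET", "UNION SELECT", "--", ";"]

-- the 'for sql in dangerous_sql: if sql in value_upper: return '''
def pvLoopA (value_upper : String) : List String → Bool
  | [] => false
  | sql :: rest => if PySem.Str.isIn sql value_upper then true else pvLoopA value_upper rest

def sanitize_sql_input (value : String) : String :=
  let value_upper := PySem.Str.upper value
  if pvLoopA value_upper pvDangerousA then "" else value

-- ===== PORT B =====
def pvDangerousB : List (List Char) :=
  ["DROP TABLE".toList, "DELETE FROM".toList, "TRUNCATE".toList, "INSERT INTO".toList,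
   "UPDATE SET".toList, "UNION SELECT".toList, "--".toList, ";".toList]

-- Source B's 'for i in range(len(v))' walked as the successive nonempty suffixes v[i:];
-- v.startswith(p, i) is Chars.startswith on the suffix.
def pvScanB (pats : List (List Char)) : List Char → Bool
  | [] => false
  | c :: rest =>
      (pats.any (fun p => PySem.Chars.startswith (c :: rest) p)) || pvScanB pats rest

def sanitize_sql_input_alt (value : String) : String :=
  let v := PySem.Str.upper value
  if pvScanB pvDangerousB v.toList then "" else value

-- ===== PRECONDITION & SPEC =====
def Spec_sanitize_sql_input (value : String) (out : String) : Prop := out = sanitize_sql_input_alt value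
instance (value : String) (out : String) : Decidable (Spec_sanitize_sql_input value out) := by unfold Spec_sanitize_sql_input; infer_instance

-- ===== CLAIM (what is proved, stated in full; the proofs are below) =====
def Claim_equal_sanitize_sql_input : Prop := ∀ (value : String), Dom_sanitize_sql_input value → Spec_sanitize_sql_input value (sanitize_sql_input value)

-- ===== LEMMAS AND PROOFS =====

-- B's scan finds a pattern iff some pattern is an infix (patterns must be nonempty).
theorem pvScanB_iff (pats : List (List Char)) (h : ∀ p ∈ pats, p ≠ []) (s : List Char) :
    pvScanB pats s = true ↔ ∃ p ∈ pats, p <:+: s := by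
  induction s with
  | nil =>
      simp only [pvScanB, List.infix_nil]
      constructor
      · intro hf; cases hf
      · rintro ⟨p, hp, rfl⟩; exact absurd rfl (h [] hp)
  | cons c rest ih =>
      simp only [pvScanB, Bool.or_eq_true, List.any_eq_true, ih,
        PySem.Chars.startswith_iff, List.infix_cons_iff]
      constructor
      · rintro (⟨p, hp, hpre⟩ | ⟨p, hp, hin⟩)
        · exact ⟨p, hp, Or.inl hpre⟩
        · exact ⟨p, hp, Or.inr hin⟩
      · rintro ⟨p, hp, hpre | hin⟩
        · exact Or.inl ⟨p, hp, hpre⟩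
        · exact Or.inr ⟨p, hp, hin⟩

-- A's loop finds a pattern iff some pattern is an infix.
theorem pvLoopA_iff (u : String) (l : List String) :
    pvLoopA u l = true ↔ ∃ sql ∈ l, sql.toList <:+: u.toList := by
  induction l with
  | nil => simp [pvLoopA]
  | cons sql rest ih =>
      simp only [pvLoopA]
      by_cases hc : PySem.Str.isIn sql u = true
      · simp only [hc, if_true, true_iff]
        exact ⟨sql, List.mem_cons_self, (PySem.Str.isIn_iff_infix sql u).mp hc⟩
      · simp only [hc, if_false, Bool.false_eq_true, ih]
        constructor
        · rintro ⟨p, hp, hin⟩; exact ⟨p, List.mem_cons_of_mem _ hp, hin⟩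
        · rintro ⟨p, hp, hin⟩
          rcases List.mem_cons.mp hp with rfl | hp'
          · exact absurd ((PySem.Str.isIn_iff_infix p u).mpr hin) hc
          · exact ⟨p, hp', hin⟩

theorem pvConds_eq (u : String) :
    pvLoopA u pvDangerousA = pvScanB pvDangerousB u.toList := by
  rw [Bool.eq_iff_iff, pvLoopA_iff, pvScanB_iff _ (by decide)]
  constructor
  · rintro ⟨sql, hm, hin⟩
    fin_cases hm <;> exact ⟨_, by decide, hin⟩
  · rintro ⟨p, hm, hin⟩
    fin_cases hm <;> exact ⟨_, by decide, hin⟩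

-- ===== VERDICT (by name: the statement is the Claim_ definition above) =====
theorem sanitize_sql_input_spec : Claim_equal_sanitize_sql_input := by
  intro value _
  show _ = _
  simp only [sanitize_sql_input, sanitize_sql_input_alt]
  rw [pvConds_eq]
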